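-- pv_equiv track=rewrite | github.com/Sushanti99/idli | news_client.py | rank_articles
-- ===== SOURCE A (Python) =====
-- def _score(article: dict, keywords: list[str]) -> int:
--     text = (article["title"] + " " + article["summary"]).lower()
--     return sum(1 for kw in keywords if kw in text)
--
-- def rank_articles(articles: list[dict], interests: list[str]) -> list[dict]:
--     """Sort articles by keyword overlap with vault interests. Deduplicate by URL."""
--     seen = set()
--     unique = []
--     for a in articles:
--         if a["url"] not in seen:
--             seen.add(a["url"])
--             unique.append(a)
--
--     scored = sorted(unique, key=lambda a: _score(a, interests), reverse=True)
--     return scored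
-- ===== SOURCE B (Python) =====
-- def _score(article: dict, keywords: list[str]) -> int:
--     text = (article["title"] + " " + article["summary"]).lower()
--     return sum(1 for kw in keywords if kw in text)
--
-- def rank_articles(articles: list[dict], interests: list[str]) -> list[dict]:
--     """Bucket (counting) sort by keyword overlap; dedupe by URL via a first-wins dict."""
--     unique = {}
--     for a in articles:
--         unique.setdefault(a["url"], a)
--     by_score = {}
--     for a in unique.values():
--         by_score.setdefault(_score(a, interests), []).append(a)
--     out = []
--     for s in reversed(range(len(interests) + 1)):
--         out.extend(by_score.get(s, []))
--     return out
-- ===== Notes on version B (the rewrite author's own statement) =====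
-- stated objective: alternative
-- what changed: Dedup now uses a first-wins dict.setdefault instead of a seen-set plus list, and the comparison sort (sorted with key, reverse=True) is replaced by a counting/bucket sort: scores are bounded by len(interests), so articles are grouped by score in a dict and emitted for scores from len(interests) down to 0, preserving the stable tie order.
import Mathlib
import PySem

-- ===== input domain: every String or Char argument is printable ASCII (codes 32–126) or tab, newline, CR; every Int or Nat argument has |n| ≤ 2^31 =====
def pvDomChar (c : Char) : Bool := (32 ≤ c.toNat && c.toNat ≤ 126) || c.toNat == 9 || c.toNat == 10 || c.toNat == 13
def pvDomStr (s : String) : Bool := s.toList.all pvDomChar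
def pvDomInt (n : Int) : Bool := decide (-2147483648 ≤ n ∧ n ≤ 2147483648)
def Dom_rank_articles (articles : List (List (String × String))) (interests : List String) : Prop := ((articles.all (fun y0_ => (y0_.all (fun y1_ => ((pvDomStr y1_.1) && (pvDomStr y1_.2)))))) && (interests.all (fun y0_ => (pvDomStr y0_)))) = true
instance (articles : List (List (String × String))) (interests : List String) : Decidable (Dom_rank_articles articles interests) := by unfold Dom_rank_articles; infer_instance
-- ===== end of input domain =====

-- B replaces A's comparison sort (sorted, key=_score, reverse=True) by a counting/bucket sort over the
-- bounded score range 0..len(interests), and the seen-set dedup by a first-wins dict; same return value.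

-- ===== PORT A =====
-- a["k"] on an article dict (first match in the association list); Pre_ guarantees the key is present
def pvGet (a : List (String × String)) (k : String) : String := (PySem.Dict.mk a).getD k ""

-- _score: text = (title + " " + summary).lower(); sum(1 for kw in keywords if kw in text) (the 0/1-sum is countP)
def pvScore (a : List (String × String)) (keywords : List String) : Int :=
  let text := PySem.Chars.lower ((pvGet a "title").toList ++ ' ' :: (pvGet a "summary").toList)
  (keywords.countP (fun kw => PySem.Chars.isIn kw.toList text) : Int)

def rank_articles (articles : List (List (String × String))) (interests : List String) : List (List (String × String)) :=
  let st := articles.foldl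
    (fun st a =>
      if PySem.Set.contains st.1 (pvGet a "url") then st
      else (PySem.Set.add st.1 (pvGet a "url"), st.2 ++ [a]))
    ((PySem.Set.empty : PySem.Set String), ([] : List (List (String × String))))
  PySem.List.sorted st.2 (fun a => pvScore a interests) true

-- ===== PORT B =====
def rank_articles_alt (articles : List (List (String × String))) (interests : List String) : List (List (String × String)) :=
  let unique := (articles.foldl (fun d a => d.setdefault (pvGet a "url") a)
      (PySem.Dict.empty : PySem.Dict String (List (String × String)))).values
  let byScore := unique.foldl (fun d a => d.modify (pvScore a interests) [] (fun l => l ++ [a]))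
      (PySem.Dict.empty : PySem.Dict Int (List (List (String × String))))
  ((PySem.List.pyRange 0 ((interests.length : Int) + 1)).reverse).foldl
    (fun out s => out ++ byScore.getD s []) []

-- ===== PRECONDITION & SPEC =====
-- the keys Python A reads, by article class, and each key's role in A; Pre_ reads its key lists off this table
def pvKeySchema : List (String × String × String) :=
  [("url", "every article", "dedup key"),
   ("title", "first-seen articles", "scored text"),
   ("summary", "first-seen articles", "scored text")]

def pvKeysFor (cls : String) : List String :=
  (pvKeySchema.filter (fun r => r.2.1 == cls)).map (fun r => r.1)

def pvHasKey (a : List (String × String)) (k : String) : Bool :=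
  ((PySem.Dict.mk a).get? k).isSome

-- Exactly where Python A returns (no KeyError): every article has key "url", and every article that is the
-- FIRST with its url (only those are scored) also has keys "title" and "summary".
def Pre_rank_articles (articles : List (List (String × String))) (interests : List String) : Prop :=
  ∀ i : Fin articles.length,
    (∀ k ∈ pvKeysFor "every article", pvHasKey (articles.get i) k = true) ∧
    ((∀ j : Fin articles.length, (j : Nat) < (i : Nat) →
        (PySem.Dict.mk (articles.get j)).get? "url" ≠ (PySem.Dict.mk (articles.get i)).get? "url") →
      ∀ k ∈ pvKeysFor "first-seen articles", pvHasKey (articles.get i) k = true)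
instance (articles : List (List (String × String))) (interests : List String) : Decidable (Pre_rank_articles articles interests) := by unfold Pre_rank_articles; infer_instance

def pvWitness_rank_articles : (List (List (String × String))) × List String :=
  ([[("url", "u1"), ("title", "big news"), ("summary", "all about cats")],
    [("url", "u2"), ("title", "dogs"), ("summary", "no cats here")],
    [("url", "u1"), ("title", "dup"), ("summary", "ignored")]],
   ["cats", "dogs", "news"])

def Spec_rank_articles (articles : List (List (String × String))) (interests : List String) (out : List (List (String × String))) : Prop := out = rank_articles_alt articles interests
instance (articles : List (List (String × String))) (interests : List String) (out : List (List (String × String))) : Decidable (Spec_rank_articles articles interests out) := by unfold Spec_rank_articles; infer_instance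

-- ===== CLAIM (what is proved, stated in full; the proofs are below) =====
def Claim_equal_rank_articles : Prop := ∀ (articles : List (List (String × String))) (interests : List String), Dom_rank_articles articles interests → Pre_rank_articles articles interests → Spec_rank_articles articles interests (rank_articles articles interests)

-- ===== LEMMAS AND PROOFS =====

-- the bucket concatenation, highest score first: pvBuckets key m xs = concat over s = m, m-1, …, 0 of the
-- (order-preserving) bucket of elements with key = s
def pvBuckets {α : Type} (key : α → Int) : Nat → List α → List α
  | 0, xs => xs.filter (fun a => key a == ((0 : Nat) : Int))
  | m + 1, xs => xs.filter (fun a => key a == ((m + 1 : Nat) : Int)) ++ pvBuckets key m xs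

theorem pvBuckets_nil {α : Type} (key : α → Int) (m : Nat) : pvBuckets key m [] = [] := by
  induction m with
  | zero => simp [pvBuckets]
  | succ m ih => simp [pvBuckets, ih]

theorem mem_pvBuckets {α : Type} (key : α → Int) (m : Nat) (xs : List α) (y : α)
    (hy : y ∈ pvBuckets key m xs) : 0 ≤ key y ∧ key y ≤ (m : Int) := by
  induction m with
  | zero =>
    rw [pvBuckets, List.mem_filter] at hy
    have : key y = ((0 : Nat) : Int) := by simpa using hy.2
    omega
  | succ m ih =>
    rw [pvBuckets, List.mem_append] at hy
    rcases hy with hy | hy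
    · rw [List.mem_filter] at hy
      have : key y = ((m + 1 : Nat) : Int) := by simpa using hy.2
      omega
    · have := ih hy
      omega

theorem pvBuckets_append_gt {α : Type} (key : α → Int) (m : Nat) (xs : List α) (x : α)
    (hx : (m : Int) < key x) : pvBuckets key m (xs ++ [x]) = pvBuckets key m xs := by
  induction m with
  | zero =>
    simp only [pvBuckets, List.filter_append]
    have hne : List.filter (fun a => key a == (0 : Int)) [x] = [] := by
      simp; omega
    simp [hne]
  | succ m ih =>
    have h1 : (m : Int) < key x := by omega
    have hne : List.filter (fun a => key a == (m : Int) + 1) [x] = [] := by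
      simp; omega
    simp [pvBuckets, List.filter_append, hne, ih h1]

theorem insertBy_append_left {α : Type} (before : α → α → Bool) (x : α) (L1 L2 : List α)
    (h : ∀ y ∈ L1, before x y = false) :
    PySem.List.insertBy before x (L1 ++ L2) = L1 ++ PySem.List.insertBy before x L2 := by
  induction L1 with
  | nil => simp
  | cons y L1 ih =>
    have hy : before x y = false := h y (by simp)
    simp [PySem.List.insertBy, hy, ih (fun z hz => h z (by simp [hz]))]

theorem insertBy_all_before {α : Type} (before : α → α → Bool) (x : α) (S : List α)
    (h : ∀ y ∈ S, before x y = true) :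
    PySem.List.insertBy before x S = x :: S := by
  cases S with
  | nil => simp [PySem.List.insertBy]
  | cons y S => simp [PySem.List.insertBy, h y (by simp)]

theorem insert_pvBuckets {α : Type} (key : α → Int) (x : α) (m : Nat) (xs : List α)
    (h0 : 0 ≤ key x) (hm : key x ≤ (m : Int)) :
    PySem.List.insertBy (fun a b => decide (key b < key a)) x (pvBuckets key m xs)
      = pvBuckets key m (xs ++ [x]) := by
  induction m with
  | zero =>
    have hx : key x = 0 := by omega
    have h1 : ∀ y ∈ pvBuckets key 0 xs, (fun a b => decide (key b < key a)) x y = false := by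
      intro y hy
      have := mem_pvBuckets key 0 xs y hy
      simp only [decide_eq_false_iff_not, not_lt]; omega
    rw [PySem.List.insertBy_of_forall_not_before _ _ _ h1]
    have hone : List.filter (fun a => key a == (0 : Int)) [x] = [x] := by
      simp [hx]
    simp [pvBuckets, List.filter_append, hone]
  | succ m ih =>
    by_cases hc : key x ≤ (m : Int)
    · -- x belongs to a lower bucket: it passes the (m+1)-bucket, then IH
      have h1 : ∀ y ∈ List.filter (fun a => key a == ((m + 1 : Nat) : Int)) xs,
          (fun a b => decide (key b < key a)) x y = false := by
        intro y hy
        rw [List.mem_filter] at hy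
        have : key y = ((m + 1 : Nat) : Int) := by simpa using hy.2
        simp only [decide_eq_false_iff_not, not_lt]; omega
      rw [pvBuckets, insertBy_append_left _ _ _ _ h1, ih hc]
      have hne : List.filter (fun a => key a == (m : Int) + 1) [x] = [] := by
        simp; omega
      simp [pvBuckets, List.filter_append, hne]
    · -- key x = m+1: x passes its own bucket and goes in front of all lower buckets
      have hx : key x = ((m + 1 : Nat) : Int) := by push_cast; omega
      have h1 : ∀ y ∈ List.filter (fun a => key a == ((m + 1 : Nat) : Int)) xs,
          (fun a b => decide (key b < key a)) x y = false := by
        intro y hy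
        rw [List.mem_filter] at hy
        have : key y = ((m + 1 : Nat) : Int) := by simpa using hy.2
        simp only [decide_eq_false_iff_not, not_lt]; omega
      have h2 : ∀ y ∈ pvBuckets key m xs, (fun a b => decide (key b < key a)) x y = true := by
        intro y hy
        have := mem_pvBuckets key m xs y hy
        simp only [decide_eq_true_eq]; omega
      rw [pvBuckets, insertBy_append_left _ _ _ _ h1, insertBy_all_before _ _ _ h2]
      have hgt : pvBuckets key m (xs ++ [x]) = pvBuckets key m xs :=
        pvBuckets_append_gt key m xs x (by omega)
      have hone : List.filter (fun a => key a == (m : Int) + 1) [x] = [x] := by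
        simp [hx]
      simp [pvBuckets, List.filter_append, hone, hgt]

theorem sorted_rev_eq_pvBuckets {α : Type} (key : α → Int) (m : Nat) (xs : List α)
    (h : ∀ a ∈ xs, 0 ≤ key a ∧ key a ≤ (m : Int)) :
    PySem.List.sorted xs key true = pvBuckets key m xs := by
  rw [PySem.List.sorted_rev_eq_foldl_insertBy]
  induction xs using List.reverseRecOn with
  | nil => simp [pvBuckets_nil]
  | append_singleton xs x ih =>
    rw [List.foldl_concat, ih (fun a ha => h a (by simp [ha]))]
    have hx := h x (by simp)
    exact insert_pvBuckets key x m xs hx.1 hx.2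

-- the reversed range(n+1) concatenation of score buckets is pvBuckets
theorem range_rev_flatMap {α : Type} (key : α → Int) (xs : List α) (m : Nat) :
    (((List.range (m + 1)).map (fun k : Nat => (k : Int))).reverse).flatMap
      (fun s => xs.filter (fun a => key a == s)) = pvBuckets key m xs := by
  induction m with
  | zero => simp [pvBuckets]
  | succ m ih =>
    rw [List.range_succ (n := m + 1), List.map_append, List.reverse_append, List.flatMap_append, ih]
    simp [pvBuckets]

-- dedup: A's seen-set loop and B's setdefault dict produce the same unique list
theorem dedup_inv (l : List (List (String × String))) (d : PySem.Dict String (List (String × String))) :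
    l.foldl
      (fun st a =>
        if PySem.Set.contains st.1 (pvGet a "url") then st
        else (PySem.Set.add st.1 (pvGet a "url"), st.2 ++ [a]))
      (d.keys, d.values)
    = ((l.foldl (fun d a => d.setdefault (pvGet a "url") a) d).keys,
       (l.foldl (fun d a => d.setdefault (pvGet a "url") a) d).values) := by
  induction l generalizing d with
  | nil => rfl
  | cons a l ih =>
    simp only [List.foldl_cons]
    by_cases hc : d.contains (pvGet a "url") = true
    · have hm : PySem.Set.contains d.keys (pvGet a "url") = true := by
        simpa [PySem.Set.contains, List.contains_iff_mem, PySem.Dict.contains_iff_mem_keys] using hc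
      rw [hm]; simp only [if_true]
      rw [PySem.Dict.setdefault_of_contains d a hc]
      exact ih d
    · have hc' : d.contains (pvGet a "url") = false := by simpa using hc
      have hmem : pvGet a "url" ∉ d.keys := by
        intro h
        rw [← PySem.Dict.contains_iff_mem_keys] at h
        rw [hc'] at h
        exact Bool.false_ne_true h
      have hm : PySem.Set.contains d.keys (pvGet a "url") = false := by
        simp [PySem.Set.contains, hmem]
      rw [hm]; simp only [Bool.false_eq_true, if_false]
      rw [PySem.Dict.setdefault_of_not_contains d a hc']
      have hk : (d.insert (pvGet a "url") a).keys = d.keys ++ [pvGet a "url"] :=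
        PySem.Dict.keys_insert_of_not_contains d a hc'
      have hv : (d.insert (pvGet a "url") a).values = d.values ++ [a] := by
        simp [PySem.Dict.values, PySem.Dict.items_insert_of_not_contains d a hc']
      have hadd : PySem.Set.add d.keys (pvGet a "url") = d.keys ++ [pvGet a "url"] := by
        simp [PySem.Set.add, hmem]
      rw [hadd, ← hk, ← hv]
      exact ih (d.insert (pvGet a "url") a)

-- B's grouping dict looked up at s is the bucket of score s
theorem byScore_getD (unique : List (List (String × String))) (interests : List String) (s : Int) :
    (unique.foldl (fun d a => d.modify (pvScore a interests) [] (fun l => l ++ [a]))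
      (PySem.Dict.empty : PySem.Dict Int (List (List (String × String))))).getD s []
    = unique.filter (fun a => pvScore a interests == s) := by
  have h : unique.foldl (fun d a => d.modify (pvScore a interests) [] (fun l => l ++ [a]))
      (PySem.Dict.empty : PySem.Dict Int (List (List (String × String))))
    = (unique.map (fun a => (pvScore a interests, a))).foldl
        (fun d p => d.modify p.1 [] (fun l => l ++ [p.2])) PySem.Dict.empty := by
    rw [List.foldl_map]
  rw [h, PySem.Dict.getD_foldl_modify_append]
  simp [List.filter_map, Function.comp_def, List.map_map]

-- ===== VERDICT (by name: the statement is the Claim_ definition above) =====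
theorem rank_articles_spec : Claim_equal_rank_articles := by
  intro articles interests _dom _pre
  unfold Spec_rank_articles
  simp only [rank_articles, rank_articles_alt]
  rw [show ((PySem.Set.empty : PySem.Set String), ([] : List (List (String × String))))
      = ((PySem.Dict.empty : PySem.Dict String (List (String × String))).keys,
         (PySem.Dict.empty : PySem.Dict String (List (String × String))).values) from rfl,
    dedup_inv articles PySem.Dict.empty]
  set u := (articles.foldl (fun d a => d.setdefault (pvGet a "url") a)
      (PySem.Dict.empty : PySem.Dict String (List (String × String)))).values with hu
  have hrange : PySem.List.pyRange 0 ((interests.length : Int) + 1)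
      = (List.range (interests.length + 1)).map (fun k : Nat => (k : Int)) := by
    have := PySem.List.pyRange_zero_natCast (interests.length + 1)
    push_cast at this
    exact this
  rw [hrange, PySem.List.foldl_append_eq_flatMap]
  have hgetD : ∀ s : Int,
      (u.foldl (fun d a => d.modify (pvScore a interests) [] (fun l => l ++ [a]))
        (PySem.Dict.empty : PySem.Dict Int (List (List (String × String))))).getD s []
      = u.filter (fun a => pvScore a interests == s) := fun s => byScore_getD u interests s
  simp only [hgetD, List.nil_append]
  rw [range_rev_flatMap (fun a => pvScore a interests) u interests.length]
  apply sorted_rev_eq_pvBuckets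
  intro a _
  simp only [pvScore]
  refine ⟨Int.natCast_nonneg _, ?_⟩
  exact_mod_cast List.countP_le_length
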